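-- pv_equiv track=rewrite | github.com/DomomLLL/newpy | jiaoben/p06-5.py | f
-- ===== SOURCE A (Python) =====
-- def f(x,y):
--     p = x
--     count = 0
--     o = 0
--     for i in range(1,y):
--         count += 1
--         x = x+p*10**count
--     o += x
--     return o
-- ===== SOURCE B (Python) =====
-- def f(x, y):
--     # Closed form: the loop sums x*10**i for i in 0..y-1, a repunit times x.
--     if y <= 1:
--         return x
--     return x * ((10 ** y - 1) // 9)
-- ===== Notes on version B (the rewrite author's own statement) =====
-- stated objective: faster
-- what changed: Replaces the O(y) loop of big-int multiplications by the closed-form geometric sum x*((10**y-1)//9), a single pow and division.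
import Mathlib
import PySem

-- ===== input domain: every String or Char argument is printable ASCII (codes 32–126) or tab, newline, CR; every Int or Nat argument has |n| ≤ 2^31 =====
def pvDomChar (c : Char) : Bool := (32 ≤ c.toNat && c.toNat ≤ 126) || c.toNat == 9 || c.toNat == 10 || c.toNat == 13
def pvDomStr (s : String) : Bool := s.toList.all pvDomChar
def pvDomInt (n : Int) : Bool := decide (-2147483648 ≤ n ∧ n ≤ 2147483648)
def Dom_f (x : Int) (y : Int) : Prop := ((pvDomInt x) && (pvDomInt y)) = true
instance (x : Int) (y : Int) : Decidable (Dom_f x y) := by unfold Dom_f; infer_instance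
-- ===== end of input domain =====

-- B replaces A's O(y) loop of additions by the closed-form geometric sum x*((10**y-1)//9) (objective: faster).


-- ===== PORT A =====
-- literal port: p = x; count = 0; o = 0; for i in range(1,y): count += 1; x += p*10**count; o += x
def f (x : Int) (y : Int) : Int :=
  let p := x
  let st := (PySem.List.pyRange 1 y 1).foldl
    (fun (st : Int × Int) _ => (st.1 + p * 10 ^ (st.2 + 1).toNat, st.2 + 1)) (x, 0)
  0 + st.1

-- ===== PORT B =====
def f_alt (x : Int) (y : Int) : Int :=
  if y ≤ 1 then x else x * PySem.Int.floordiv (10 ^ y.toNat - 1) 9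

-- ===== PRECONDITION & SPEC =====
def Spec_f (x : Int) (y : Int) (out : Int) : Prop := out = f_alt x y
instance (x : Int) (y : Int) (out : Int) : Decidable (Spec_f x y out) := by unfold Spec_f; infer_instance

-- ===== CLAIM (what is proved, stated in full; the proofs are below) =====
def Claim_equal_f : Prop := ∀ (x : Int) (y : Int), Dom_f x y → Spec_f x y (f x y)

-- ===== LEMMAS AND PROOFS =====

-- repunit: g n = 1 + 10 + … + 10^(n-1)
def pvRep : Nat → Int
  | 0 => 0
  | n + 1 => 1 + 10 * pvRep n

theorem pvRep_mul_nine (n : Nat) : 9 * pvRep n = 10 ^ n - 1 := by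
  induction n with
  | zero => simp [pvRep]
  | succ n ih => simp [pvRep, pow_succ]; linarith

-- A's loop invariant: starting at count = c (a Nat cast), after |l| iterations
theorem pvLoopA (p : Int) (l : List Int) : ∀ (v : Int) (c : Nat),
    l.foldl (fun (st : Int × Int) _ => (st.1 + p * 10 ^ (st.2 + 1).toNat, st.2 + 1)) (v, (c : Int))
      = (v + p * 10 ^ (c + 1) * pvRep l.length, (c : Int) + l.length) := by
  induction l with
  | nil => intro v c; simp [pvRep]
  | cons a t ih =>
      intro v c
      have h1 : ((c : Int) + 1) = ((c + 1 : Nat) : Int) := by push_cast; ring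
      have h2 : ((c : Int) + 1).toNat = c + 1 := by omega
      simp only [List.foldl_cons, h1, ih, Prod.mk.injEq]
      refine ⟨?_, ?_⟩
      · simp only [Int.toNat_natCast, pvRep, List.length_cons, pow_succ]; ring
      · push_cast [List.length_cons]; ring

theorem f_eq_rep (x y : Int) : f x y = x + x * 10 * pvRep (y - 1).toNat := by
  show 0 + ((PySem.List.pyRange 1 y 1).foldl
      (fun (st : Int × Int) _ => (st.1 + x * 10 ^ (st.2 + 1).toNat, st.2 + 1))
      (x, ((0 : Nat) : Int))).1 = _
  rw [pvLoopA]
  simp only [PySem.List.length_pyRange_one]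
  ring

-- ===== VERDICT (by name: the statement is the Claim_ definition above) =====
theorem f_spec : Claim_equal_f := by
  intro x y _
  show f x y = f_alt x y
  rw [f_eq_rep]
  unfold f_alt
  by_cases h : y ≤ 1
  · have : (y - 1).toNat = 0 := by omega
    simp [h, this, pvRep]
  · have hy : y.toNat = (y - 1).toNat + 1 := by omega
    rw [if_neg h, ← pvRep_mul_nine, PySem.Int.floordiv_eq_ediv_of_pos (by norm_num),
      mul_comm (9 : Int), Int.mul_ediv_cancel _ (by norm_num)]
    simp only [hy, pvRep]
    ring
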